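-- pv_equiv track=rewrite | github.com/googleboy-byte/hermes-db | proc/parse_input.py | combine_paths_to_graph
-- ===== SOURCE A (Python) =====
-- def combine_paths_to_graph(paths):
--     combined_graph = {}
--
--     # Iterate through each path (which is a dictionary)
--     for path in paths:
--         # For each node in the path dictionary, combine the edges
--         for node, edges in path.items():
--             if node not in combined_graph:
--                 combined_graph[node] = []
--
--             # Add edges for the node, ensuring no duplicate edges
--             for edge in edges:
--                 if edge not in combined_graph[node]:
--                     combined_graph[node].append(edge)
--
--     return combined_graph
-- ===== SOURCE B (Python) =====
-- def combine_paths_to_graph(paths):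
--     combined_graph = {}
--     # Gather phase: concatenate ALL edges per node, duplicates included
--     for path in paths:
--         for node, edges in path.items():
--             combined_graph.setdefault(node, []).extend(edges)
--     # Dedup phase: keep the first occurrence of each edge, preserving order
--     return {node: list(dict.fromkeys(edges)) for node, edges in combined_graph.items()}
-- ===== Notes on version B (the rewrite author's own statement) =====
-- stated objective: faster
-- what changed: A dedups with a linear 'edge not in list' scan inside the gather loop; B first concatenates all edges per node with setdefault/extend and then dedups each value once with dict.fromkeys (hash-based), removing the quadratic inner membership scan.
import Mathlib
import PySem

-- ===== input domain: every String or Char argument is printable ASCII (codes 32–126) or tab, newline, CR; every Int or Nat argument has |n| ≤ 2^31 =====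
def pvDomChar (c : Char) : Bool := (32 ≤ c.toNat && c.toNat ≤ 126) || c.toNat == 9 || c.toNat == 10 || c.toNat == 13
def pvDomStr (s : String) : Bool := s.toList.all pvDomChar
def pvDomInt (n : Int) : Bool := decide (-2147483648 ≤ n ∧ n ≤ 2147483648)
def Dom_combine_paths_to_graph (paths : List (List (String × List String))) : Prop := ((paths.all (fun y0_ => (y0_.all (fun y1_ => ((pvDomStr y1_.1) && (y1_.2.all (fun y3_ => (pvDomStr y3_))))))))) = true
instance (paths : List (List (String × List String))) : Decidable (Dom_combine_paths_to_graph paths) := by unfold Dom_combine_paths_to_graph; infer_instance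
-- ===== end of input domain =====

-- B gathers all edges per node first and dedups each list once afterwards, instead of
-- A's per-edge membership scan inside the gather loop (different decomposition; faster in Python).

-- ===== PORT A =====
-- literal transliteration of A: one interleaved loop; 'edge not in combined_graph[node]'
-- is the membership test on the node's current (always present) list.
def combine_paths_to_graph (paths : List (List (String × List String))) : List (String × List String) :=
  (paths.foldl (fun g path =>
    path.foldl (fun g p =>
      let g1 := if g.contains p.1 then g else g.insert p.1 ([] : List String)
      p.2.foldl (fun g e =>
        if e ∈ g.getD p.1 [] then g else g.modify p.1 [] (fun v => v ++ [e])) g1)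
    g) PySem.Dict.empty).items

-- ===== PORT B =====
-- gather phase: combined_graph.setdefault(node, []).extend(edges) = modify node [] (· ++ edges);
-- dedup phase: list(dict.fromkeys(edges)) = PySem.Set.ofList (first-occurrence order).
def combine_paths_to_graph_alt (paths : List (List (String × List String))) : List (String × List String) :=
  (paths.foldl (fun g path =>
    path.foldl (fun g p => g.modify p.1 [] (fun v => v ++ p.2)) g)
    PySem.Dict.empty).items.map (fun p => (p.1, PySem.Set.ofList p.2))

-- ===== PRECONDITION & SPEC =====
def Spec_combine_paths_to_graph (paths : List (List (String × List String))) (out : List (String × List String)) : Prop := out = combine_paths_to_graph_alt paths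
instance (paths : List (List (String × List String))) (out : List (String × List String)) : Decidable (Spec_combine_paths_to_graph paths out) := by unfold Spec_combine_paths_to_graph; infer_instance

-- ===== CLAIM (what is proved, stated in full; the proofs are below) =====
def Claim_equal_combine_paths_to_graph : Prop := ∀ (paths : List (List (String × List String))), Dom_combine_paths_to_graph paths → Spec_combine_paths_to_graph paths (combine_paths_to_graph paths)

-- ===== LEMMAS AND PROOFS =====

-- The invariant linking A's running dict (deduped values) to B's gather dict (raw values).
def pvInv (gA gB : PySem.Dict String (List String)) : Prop :=
  gA.keys = gB.keys ∧ gB.keys.Nodup ∧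
    ∀ j, gA.getD j [] = PySem.Set.ofList (gB.getD j [])

-- A's inner edge loop computed through getD: it is Set.update at key k.
theorem pvEdgesFold_getD (k : String) (es : List String)
    (g : PySem.Dict String (List String)) (j : String) :
    (es.foldl (fun g e =>
        if e ∈ g.getD k [] then g else g.modify k [] (fun v => v ++ [e])) g).getD j []
      = if j = k then PySem.Set.update (g.getD k []) es else g.getD j [] := by
  induction es generalizing g with
  | nil =>
    by_cases hj : j = k
    · rw [List.foldl_nil, if_pos hj, hj]; rfl
    · rw [List.foldl_nil, if_neg hj]
  | cons e es ih =>
    simp only [List.foldl_cons]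
    by_cases he : e ∈ g.getD k []
    · rw [if_pos he, ih, PySem.Set.update_cons, PySem.Set.add_of_mem he]
    · rw [if_neg he, ih, PySem.Set.update_cons, PySem.Set.add_of_not_mem he]
      by_cases hj : j = k
      · rw [if_pos hj, if_pos hj, PySem.Dict.getD_modify_self]
      · rw [if_neg hj, if_neg hj, PySem.Dict.getD_modify_of_ne _ _ _ hj]

-- A's inner edge loop does not change the key list when k is already present.
theorem pvEdgesFold_keys (k : String) (es : List String)
    (g : PySem.Dict String (List String)) (hk : g.contains k = true) :
    (es.foldl (fun g e =>
        if e ∈ g.getD k [] then g else g.modify k [] (fun v => v ++ [e])) g).keys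
      = g.keys := by
  induction es generalizing g with
  | nil => rfl
  | cons e es ih =>
    simp only [List.foldl_cons]
    by_cases he : e ∈ g.getD k []
    · rw [if_pos he, ih g hk]
    · rw [if_neg he, ih _ (by simp [PySem.Dict.contains_modify, hk]),
        PySem.Dict.keys_modify, PySem.Dict.keys_insert_of_contains _ _ hk]

-- One (node, edges) item step preserves the invariant.
theorem pvItemStep (gA gB : PySem.Dict String (List String))
    (p : String × List String) (h : pvInv gA gB) :
    pvInv
      (let g1 := if gA.contains p.1 then gA else gA.insert p.1 ([] : List String)
       p.2.foldl (fun g e =>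
         if e ∈ g.getD p.1 [] then g else g.modify p.1 [] (fun v => v ++ [e])) g1)
      (gB.modify p.1 [] (fun v => v ++ p.2)) := by
  obtain ⟨hkeys, hnd, hval⟩ := h
  have hcont : gA.contains p.1 = gB.contains p.1 := by
    rw [PySem.Dict.contains_eq_decide_mem_keys, PySem.Dict.contains_eq_decide_mem_keys, hkeys]
  have hg1c : (if gA.contains p.1 then gA else gA.insert p.1 ([] : List String)).contains p.1 = true := by
    by_cases hc : gA.contains p.1
    · simp [hc]
    · simp [hc, PySem.Dict.contains_insert_self]
  have hg1keys : (if gA.contains p.1 then gA else gA.insert p.1 ([] : List String)).keys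
      = if gA.contains p.1 then gA.keys else gA.keys ++ [p.1] := by
    by_cases hc : gA.contains p.1
    · simp [hc]
    · rw [if_neg hc, if_neg hc,
        PySem.Dict.keys_insert_of_not_contains _ _ (Bool.eq_false_iff.mpr hc)]
  have hg1val : ∀ j, (if gA.contains p.1 then gA else gA.insert p.1 ([] : List String)).getD j []
      = gA.getD j [] := by
    intro j
    by_cases hc : gA.contains p.1
    · simp [hc]
    · rw [if_neg hc, PySem.Dict.getD_insert]
      by_cases hj : j = p.1
      · rw [if_pos hj, hj,
          PySem.Dict.getD_of_not_contains _ _ (Bool.eq_false_iff.mpr hc)]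
      · rw [if_neg hj]
  refine ⟨?_, ?_, ?_⟩
  · rw [pvEdgesFold_keys _ _ _ hg1c, hg1keys, hcont, hkeys, PySem.Dict.keys_modify]
    by_cases hc : gB.contains p.1
    · rw [if_pos hc, PySem.Dict.keys_insert_of_contains _ _ hc]
    · rw [if_neg hc, PySem.Dict.keys_insert_of_not_contains _ _ (Bool.eq_false_iff.mpr hc)]
  · rw [PySem.Dict.keys_modify]
    exact PySem.Dict.nodup_keys_insert _ _ _ hnd
  · intro j
    rw [pvEdgesFold_getD, PySem.Dict.getD_modify]
    by_cases hj : j = p.1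
    · rw [if_pos hj, if_pos hj, hg1val, hval, ← PySem.Set.ofList_append]
    · rw [if_neg hj, if_neg hj, hg1val, hval]

-- One path (list of items) preserves the invariant.
theorem pvPathStep (path : List (String × List String))
    (gA gB : PySem.Dict String (List String)) (h : pvInv gA gB) :
    pvInv
      (path.foldl (fun g p =>
        let g1 := if g.contains p.1 then g else g.insert p.1 ([] : List String)
        p.2.foldl (fun g e =>
          if e ∈ g.getD p.1 [] then g else g.modify p.1 [] (fun v => v ++ [e])) g1) gA)
      (path.foldl (fun g p => g.modify p.1 [] (fun v => v ++ p.2)) gB) := by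
  induction path generalizing gA gB with
  | nil => exact h
  | cons p rest ih => exact ih _ _ (pvItemStep gA gB p h)

-- The whole fold over paths preserves the invariant.
theorem pvPathsFoldAux (paths : List (List (String × List String)))
    (gA gB : PySem.Dict String (List String)) (h : pvInv gA gB) :
    pvInv
      (paths.foldl (fun g path =>
        path.foldl (fun g p =>
          let g1 := if g.contains p.1 then g else g.insert p.1 ([] : List String)
          p.2.foldl (fun g e =>
            if e ∈ g.getD p.1 [] then g else g.modify p.1 [] (fun v => v ++ [e])) g1) g)
        gA)
      (paths.foldl (fun g path =>
        path.foldl (fun g p => g.modify p.1 [] (fun v => v ++ p.2)) g) gB) := by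
  induction paths generalizing gA gB with
  | nil => exact h
  | cons path rest ih => exact ih _ _ (pvPathStep path gA gB h)

theorem pvInv_empty : pvInv (PySem.Dict.empty : PySem.Dict String (List String)) PySem.Dict.empty := by
  refine ⟨rfl, ?_, fun j => ?_⟩
  · simp [PySem.Dict.keys_empty]
  · simp [PySem.Dict.getD_empty]

-- ===== VERDICT (by name: the statement is the Claim_ definition above) =====
theorem combine_paths_to_graph_spec : Claim_equal_combine_paths_to_graph := by
  intro paths _
  unfold Spec_combine_paths_to_graph combine_paths_to_graph combine_paths_to_graph_alt
  obtain ⟨hkeys, hnd, hval⟩ := pvPathsFoldAux paths PySem.Dict.empty PySem.Dict.empty pvInv_empty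
  rw [PySem.Dict.items_eq_map_keys _ (by rw [hkeys]; exact hnd) ([] : List String),
    PySem.Dict.items_eq_map_keys _ hnd ([] : List String), List.map_map, hkeys]
  exact List.map_congr_left (fun k _ => by simp [hval k])
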